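-- pv_equiv track=rewrite | github.com/TonyTaoLiu/2023-neural-dynamics-of-movement-and-cognition | main_code/monkey/TaoLiu/CEBRA/motor_visualize.py | find_animal_indices_noexpand
-- ===== SOURCE A (Python) =====
-- def find_animal_indices_noexpand(pairIndex_expand,animalIndex):
--     '''
--     This function is to divide the pair index into several groups according to different monkeys used to train classifier
--     Parameters ()
--     ----------
--     pairIndex_expend, list of pair index
--     animalIndex, list, information of which monkey the sessions belong to
--
--     Returns
--     -------
--     animal_indices_4, list of sessions which has been divided into different groups according to monkeys, the recordings
--     of left and right hemisphere of Chewie are seemed as different monkeys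
--     animal_indices_3, list of sessions which has been divided into different groups according to monkeys, the recordings
--     of left and right hemisphere of Chewie are seemed as same monkeys
--     '''
--     animal_indices_4 = [[],[],[],[]]
--     animal_indices_3 = [[],[],[]]
--     for i in range(len(pairIndex_expand)):
--         if pairIndex_expand[i][0] in animalIndex[0]:
--             animal_indices_4[0].append(i)
--             animal_indices_3[0].append(i)
--         elif pairIndex_expand[i][0] in animalIndex[1]:
--             animal_indices_4[1].append(i)
--             animal_indices_3[0].append(i)
--         elif pairIndex_expand[i][0] in animalIndex[2]:
--             animal_indices_4[2].append(i)
--             animal_indices_3[1].append(i)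
--         elif pairIndex_expand[i][0] in animalIndex[3]:
--             animal_indices_4[3].append(i)
--             animal_indices_3[2].append(i)
--
--     return animal_indices_4, animal_indices_3
-- ===== SOURCE B (Python) =====
-- def find_animal_indices_noexpand(pairIndex_expand, animalIndex):
--     # Staged passes: first label every pair with its first-matching group
--     # (0..3, -1 = unclassified), then build each output list by a separate
--     # filter comprehension over the label sequence (group-major construction).
--     # Correct because each filter keeps indices in increasing order, which is
--     # exactly the order the original's single pass appends them in.
--     def label(v):
--         for g in range(4):
--             if v in animalIndex[g]:
--                 return g
--         return -1
--     labels = [label(pair[0]) for pair in pairIndex_expand]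
--     animal_indices_4 = [[i for i, g in enumerate(labels) if g == k]
--                         for k in range(4)]
--     animal_indices_3 = [[i for i, g in enumerate(labels) if g in grp]
--                         for grp in ((0, 1), (2,), (3,))]
--     return animal_indices_4, animal_indices_3
-- ===== Notes on version B (the rewrite author's own statement) =====
-- stated objective: alternative
-- what changed: Replaces A's single item-major pass with seven mutated accumulator lists by a staged group-major construction: one pass computes a label 0..3/-1 for every pair, then each of the seven output lists is built independently by its own filter over the label sequence.
import Mathlib
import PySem

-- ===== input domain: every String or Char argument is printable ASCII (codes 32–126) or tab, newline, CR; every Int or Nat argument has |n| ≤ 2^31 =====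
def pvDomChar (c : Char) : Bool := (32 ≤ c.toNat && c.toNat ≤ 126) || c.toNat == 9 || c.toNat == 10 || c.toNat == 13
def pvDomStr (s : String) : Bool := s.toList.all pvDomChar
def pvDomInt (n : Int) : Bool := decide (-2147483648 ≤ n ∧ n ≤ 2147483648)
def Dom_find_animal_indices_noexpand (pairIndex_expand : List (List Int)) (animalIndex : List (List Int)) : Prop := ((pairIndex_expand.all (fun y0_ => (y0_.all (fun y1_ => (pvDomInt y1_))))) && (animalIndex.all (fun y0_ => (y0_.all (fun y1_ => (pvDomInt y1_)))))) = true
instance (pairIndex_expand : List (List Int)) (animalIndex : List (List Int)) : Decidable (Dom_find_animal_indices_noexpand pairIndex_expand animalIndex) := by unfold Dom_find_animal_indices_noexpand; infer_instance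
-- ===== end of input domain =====

-- B rebuilds the outputs group-major: a labeling pass then one filter per output list; same return value wherever A returns.


-- ===== PORT A =====
-- the 'for i in range(len(pairIndex_expand))' loop with the if/elif membership
-- chain, carrying the seven accumulator lists.  pair[0] is ported as headD 0 and
-- animalIndex[j] as getD j []: exact wherever Python does not raise (Pre_ below).
def pvAgo (ai : List (List Int)) (ps : List (List Int)) (i : Int)
    (a40 a41 a42 a43 a30 a31 a32 : List Int) : List (List Int) × List (List Int) :=
  match ps with
  | [] => ([a40, a41, a42, a43], [a30, a31, a32])
  | p :: rest =>
    let h := p.headD 0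
    if (ai.getD 0 []).contains h then pvAgo ai rest (i+1) (a40 ++ [i]) a41 a42 a43 (a30 ++ [i]) a31 a32
    else if (ai.getD 1 []).contains h then pvAgo ai rest (i+1) a40 (a41 ++ [i]) a42 a43 (a30 ++ [i]) a31 a32
    else if (ai.getD 2 []).contains h then pvAgo ai rest (i+1) a40 a41 (a42 ++ [i]) a43 a30 (a31 ++ [i]) a32
    else if (ai.getD 3 []).contains h then pvAgo ai rest (i+1) a40 a41 a42 (a43 ++ [i]) a30 a31 (a32 ++ [i])
    else pvAgo ai rest (i+1) a40 a41 a42 a43 a30 a31 a32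

def find_animal_indices_noexpand (pairIndex_expand : List (List Int)) (animalIndex : List (List Int)) : List (List Int) × List (List Int) :=
  pvAgo animalIndex pairIndex_expand 0 [] [] [] [] [] [] []

-- ===== PORT B =====
-- def label(v): for g in range(4): if v in animalIndex[g]: return g; return -1
def pvLabelGo (ai : List (List Int)) (v : Int) : List Int → Int
  | [] => -1
  | g :: gs => if (ai.getD g.toNat []).contains v then g else pvLabelGo ai v gs

def pvLabel (ai : List (List Int)) (v : Int) : Int :=
  pvLabelGo ai v (PySem.List.pyRange 0 4 1)

-- labels = [label(pair[0]) for pair in pairIndex_expand]; then each output list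
-- is its own filter comprehension over enumerate(labels).
def find_animal_indices_noexpand_alt (pairIndex_expand : List (List Int)) (animalIndex : List (List Int)) : List (List Int) × List (List Int) :=
  let labels := pairIndex_expand.map (fun p => pvLabel animalIndex (p.headD 0))
  ((PySem.List.pyRange 0 4 1).map (fun k =>
      (PySem.List.enumerate labels 0).filterMap
        (fun ig => if ig.2 == k then some ig.1 else none)),
   ([[0, 1], [2], [3]] : List (List Int)).map (fun grp =>
      (PySem.List.enumerate labels 0).filterMap
        (fun ig => if grp.contains ig.2 then some ig.1 else none)))

-- ===== PRECONDITION & SPEC =====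
-- Pre_ = exactly the inputs where Python A returns: every pair is nonempty and its
-- first element is classified before the elif chain would index animalIndex out of
-- range (automatic when animalIndex has at least 4 sublists).
def Pre_find_animal_indices_noexpand (pairIndex_expand : List (List Int)) (animalIndex : List (List Int)) : Prop :=
  (pairIndex_expand.all (fun p =>
    !p.isEmpty && (decide (4 ≤ animalIndex.length) || animalIndex.any (fun l => l.contains (p.headD 0))))) = true
instance (pairIndex_expand : List (List Int)) (animalIndex : List (List Int)) : Decidable (Pre_find_animal_indices_noexpand pairIndex_expand animalIndex) := by unfold Pre_find_animal_indices_noexpand; infer_instance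

def pvWitness_find_animal_indices_noexpand : List (List Int) × List (List Int) :=
  ([[0], [1]], [[0], [1], [2], [3]])

def Spec_find_animal_indices_noexpand (pairIndex_expand : List (List Int)) (animalIndex : List (List Int)) (out : List (List Int) × List (List Int)) : Prop := out = find_animal_indices_noexpand_alt pairIndex_expand animalIndex
instance (pairIndex_expand : List (List Int)) (animalIndex : List (List Int)) (out : List (List Int) × List (List Int)) : Decidable (Spec_find_animal_indices_noexpand pairIndex_expand animalIndex out) := by unfold Spec_find_animal_indices_noexpand; infer_instance

-- ===== CLAIM (what is proved, stated in full; the proofs are below) =====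
def Claim_equal_find_animal_indices_noexpand : Prop := ∀ (pairIndex_expand : List (List Int)) (animalIndex : List (List Int)), Dom_find_animal_indices_noexpand pairIndex_expand animalIndex → Pre_find_animal_indices_noexpand pairIndex_expand animalIndex → Spec_find_animal_indices_noexpand pairIndex_expand animalIndex (find_animal_indices_noexpand pairIndex_expand animalIndex)

-- ===== LEMMAS AND PROOFS =====

-- B's label as A's four-way elif chain
theorem pvLabel_eq (ai : List (List Int)) (v : Int) :
    pvLabel ai v
      = if (ai.getD 0 []).contains v then 0
        else if (ai.getD 1 []).contains v then 1
        else if (ai.getD 2 []).contains v then 2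
        else if (ai.getD 3 []).contains v then 3
        else -1 := by
  have h4 : PySem.List.pyRange 0 4 1 = [0, 1, 2, 3] := by decide
  simp [pvLabel, h4, pvLabelGo]

-- one of B's filters over the labels of ps, from start index i
def pvF (ai : List (List Int)) (ps : List (List Int)) (i k : Int) : List Int :=
  (PySem.List.enumerate (ps.map (fun p => pvLabel ai (p.headD 0))) i).filterMap
    (fun ig => if ig.2 == k then some ig.1 else none)

def pvF3 (ai : List (List Int)) (ps : List (List Int)) (i : Int) (grp : List Int) : List Int :=
  (PySem.List.enumerate (ps.map (fun p => pvLabel ai (p.headD 0))) i).filterMap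
    (fun ig => if grp.contains ig.2 then some ig.1 else none)

-- one B filter, unfolded one step
theorem pvF_cons (ai : List (List Int)) (p : List Int) (rest : List (List Int)) (i k : Int) :
    pvF ai (p :: rest) i k
      = if pvLabel ai (p.headD 0) = k then i :: pvF ai rest (i+1) k
        else pvF ai rest (i+1) k := by
  by_cases hc : pvLabel ai (p.headD 0) = k <;>
    (rw [List.headD_eq_head?_getD] at hc; simp [pvF, PySem.List.enumerate_cons, hc])

theorem pvF3_cons (ai : List (List Int)) (p : List Int) (rest : List (List Int)) (i : Int) (grp : List Int) :
    pvF3 ai (p :: rest) i grp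
      = if pvLabel ai (p.headD 0) ∈ grp then i :: pvF3 ai rest (i+1) grp
        else pvF3 ai rest (i+1) grp := by
  by_cases hc : pvLabel ai (p.headD 0) ∈ grp <;>
    (rw [List.headD_eq_head?_getD] at hc; simp [pvF3, PySem.List.enumerate_cons, hc])

-- A's loop, from any accumulator state, produces the accumulators extended by B's filters
theorem pvAgo_eq (ai : List (List Int)) (ps : List (List Int)) :
    ∀ (i : Int) (a40 a41 a42 a43 a30 a31 a32 : List Int),
    pvAgo ai ps i a40 a41 a42 a43 a30 a31 a32
      = ([a40 ++ pvF ai ps i 0, a41 ++ pvF ai ps i 1, a42 ++ pvF ai ps i 2, a43 ++ pvF ai ps i 3],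
         [a30 ++ pvF3 ai ps i [0, 1], a31 ++ pvF3 ai ps i [2], a32 ++ pvF3 ai ps i [3]]) := by
  induction ps with
  | nil =>
    intro i a40 a41 a42 a43 a30 a31 a32
    simp [pvAgo, pvF, pvF3, PySem.List.enumerate_nil]
  | cons p rest ih =>
    intro i a40 a41 a42 a43 a30 a31 a32
    rw [pvAgo]
    simp only [ih, pvF_cons, pvF3_cons, pvLabel_eq]
    by_cases h0 : p.head?.getD 0 ∈ (ai[0]?.getD []) <;>
      by_cases h1 : p.head?.getD 0 ∈ (ai[1]?.getD []) <;>
        by_cases h2 : p.head?.getD 0 ∈ (ai[2]?.getD []) <;>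
          by_cases h3 : p.head?.getD 0 ∈ (ai[3]?.getD []) <;>
            simp [h0, h1, h2, h3, List.append_assoc]

-- ===== VERDICT (by name: the statement is the Claim_ definition above) =====
theorem find_animal_indices_noexpand_spec : Claim_equal_find_animal_indices_noexpand := by
  intro pe ai _ _
  unfold Spec_find_animal_indices_noexpand find_animal_indices_noexpand find_animal_indices_noexpand_alt
  rw [pvAgo_eq]
  have h4 : PySem.List.pyRange 0 4 1 = [0, 1, 2, 3] := by decide
  simp [h4, pvF, pvF3]
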